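-- pv_equiv track=rewrite | github.com/vivesca/vivesca | src/metabolon/organelles/engram.py | _make_line_context
-- ===== SOURCE A (Python) =====
-- def _make_line_context(
--     text: str,
--     match_start: int,
--     context_lines: int,
-- ) -> tuple[str, list[str], list[str]]:
--     if not text:
--         return "", [], []
--
--     text_lines = text.splitlines() or [text]
--     current_offset = 0
--     match_line_index = 0
--
--     for line_index, line in enumerate(text_lines):
--         line_end = current_offset + len(line)
--         if match_start <= line_end or line_index == len(text_lines) - 1:
--             match_line_index = line_index
--             break
--         current_offset = line_end + 1
--
--     if context_lines <= 0:
--         return text_lines[match_line_index], [], []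
--
--     start_index = max(0, match_line_index - context_lines)
--     end_index = min(len(text_lines), match_line_index + context_lines + 1)
--     return (
--         text_lines[match_line_index],
--         text_lines[start_index:match_line_index],
--         text_lines[match_line_index + 1 : end_index],
--     )
-- ===== SOURCE B (Python) =====
-- def _make_line_context(text, match_start, context_lines):
--     if not text:
--         return "", [], []
--
--     text_lines = text.splitlines() or [text]
--
--     # cumulative line-end offsets (each line costs len(line)+1 with its separator)
--     ends = []
--     offset = 0
--     for line in text_lines:
--         end = offset + len(line)
--         ends.append(end)
--         offset = end + 1
--
--     # bisect_left over the (strictly increasing) end offsets, clamped to last line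
--     lo, hi = 0, len(ends)
--     while lo < hi:
--         mid = (lo + hi) // 2
--         if ends[mid] < match_start:
--             lo = mid + 1
--         else:
--             hi = mid
--     match_line_index = min(lo, len(text_lines) - 1)
--
--     if context_lines <= 0:
--         return text_lines[match_line_index], [], []
--
--     start_index = max(0, match_line_index - context_lines)
--     end_index = min(len(text_lines), match_line_index + context_lines + 1)
--     return (
--         text_lines[match_line_index],
--         text_lines[start_index:match_line_index],
--         text_lines[match_line_index + 1 : end_index],
--     )
-- ===== Notes on version B (the rewrite author's own statement) =====
-- stated objective: alternative
-- what changed: Replaces A's linear running-offset scan over the lines by a precomputed list of cumulative line-end offsets queried with a hand-written bisect_left (binary search), clamped to the last line; the guard and context-slice arithmetic are unchanged.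
import Mathlib
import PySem

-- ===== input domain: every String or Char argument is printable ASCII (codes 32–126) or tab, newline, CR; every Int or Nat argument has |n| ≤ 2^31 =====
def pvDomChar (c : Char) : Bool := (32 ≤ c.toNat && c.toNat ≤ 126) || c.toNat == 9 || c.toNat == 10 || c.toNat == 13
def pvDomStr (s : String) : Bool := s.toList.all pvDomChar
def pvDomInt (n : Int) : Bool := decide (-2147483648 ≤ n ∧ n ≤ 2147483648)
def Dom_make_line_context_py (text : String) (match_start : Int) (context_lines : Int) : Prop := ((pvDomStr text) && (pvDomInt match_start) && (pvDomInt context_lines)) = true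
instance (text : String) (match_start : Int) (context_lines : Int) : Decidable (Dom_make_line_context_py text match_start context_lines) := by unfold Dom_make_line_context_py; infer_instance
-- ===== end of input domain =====

-- B replaces A's linear running-offset scan by a precomputed list of cumulative
-- line-end offsets plus a hand-written bisect_left (binary search), clamped to the
-- last line; same result, different lookup structure.

-- ===== PORT A =====
-- the 'for line_index, line in enumerate(text_lines): …' loop of A, with its
-- running offset, running index, and the Python fall-through value 0 for an
-- exhausted loop; total = len(text_lines)
def aLoop (ms : Int) : List String → Nat → Int → Nat → Nat
  | [], _, _, _ => 0
  | line :: rest, i, off, total =>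
    let lineEnd := off + PySem.Str.len line
    if ms ≤ lineEnd ∨ i = total - 1 then i
    else aLoop ms rest (i + 1) (lineEnd + 1) total

def make_line_context_py (text : String) (match_start : Int) (context_lines : Int) : String × List String × List String :=
  if text.toList = [] then ("", [], [])
  else
    let tl := PySem.Str.splitlines text
    let text_lines := if tl = [] then [text] else tl
    let mli := aLoop match_start text_lines 0 0 text_lines.length
    if context_lines ≤ 0 then (PySem.List.pyGetD text_lines (mli : Int) "", [], [])
    else
      let start_index := max 0 ((mli : Int) - context_lines)
      let end_index := min (PySem.List.len text_lines) ((mli : Int) + context_lines + 1)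
      (PySem.List.pyGetD text_lines (mli : Int) "",
       PySem.List.slice text_lines (some start_index) (some (mli : Int)),
       PySem.List.slice text_lines (some ((mli : Int) + 1)) (some end_index))

-- ===== PORT B =====
-- B's first loop: the list 'ends' of cumulative line-end offsets
def endsOf : List String → Int → List Int
  | [], _ => []
  | line :: rest, off =>
    let e := off + PySem.Str.len line
    e :: endsOf rest (e + 1)

-- B's 'while lo < hi' bisect_left loop (lo, hi are nonnegative Python ints, ported as Nat;
-- (lo+hi)//2 on nonnegative ints is Nat division; the fuel argument hi - lo only makes the
-- loop structurally recursive — it strictly exceeds the number of iterations)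
def bisectGo (ends : List Int) (x : Int) : Nat → Nat → Nat → Nat
  | 0, lo, _ => lo
  | fuel + 1, lo, hi =>
    if lo < hi then
      let mid := (lo + hi) / 2
      if PySem.List.pyGetD ends (mid : Int) 0 < x then bisectGo ends x fuel (mid + 1) hi
      else bisectGo ends x fuel lo mid
    else lo

def bisectLoop (ends : List Int) (x : Int) (lo hi : Nat) : Nat :=
  bisectGo ends x (hi - lo) lo hi

def make_line_context_py_alt (text : String) (match_start : Int) (context_lines : Int) : String × List String × List String :=
  if text.toList = [] then ("", [], [])
  else
    let tl := PySem.Str.splitlines text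
    let text_lines := if tl = [] then [text] else tl
    let ends := endsOf text_lines 0
    let lo := bisectLoop ends match_start 0 ends.length
    let mli := min lo (text_lines.length - 1)
    if context_lines ≤ 0 then (PySem.List.pyGetD text_lines (mli : Int) "", [], [])
    else
      let start_index := max 0 ((mli : Int) - context_lines)
      let end_index := min (PySem.List.len text_lines) ((mli : Int) + context_lines + 1)
      (PySem.List.pyGetD text_lines (mli : Int) "",
       PySem.List.slice text_lines (some start_index) (some (mli : Int)),
       PySem.List.slice text_lines (some ((mli : Int) + 1)) (some end_index))

-- ===== PRECONDITION & SPEC =====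
def Spec_make_line_context_py (text : String) (match_start : Int) (context_lines : Int) (out : String × List String × List String) : Prop := out = make_line_context_py_alt text match_start context_lines
instance (text : String) (match_start : Int) (context_lines : Int) (out : String × List String × List String) : Decidable (Spec_make_line_context_py text match_start context_lines out) := by unfold Spec_make_line_context_py; infer_instance

-- ===== CLAIM (what is proved, stated in full; the proofs are below) =====
def Claim_equal_make_line_context_py : Prop := ∀ (text : String) (match_start : Int) (context_lines : Int), Dom_make_line_context_py text match_start context_lines → Spec_make_line_context_py text match_start context_lines (make_line_context_py text match_start context_lines)

-- ===== LEMMAS AND PROOFS =====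

theorem endsOf_length (ls : List String) (off : Int) : (endsOf ls off).length = ls.length := by
  induction ls generalizing off with
  | nil => rfl
  | cons l rest ih => simpa [endsOf] using ih _

theorem le_of_mem_endsOf (ls : List String) (off : Int) (y : Int) (h : y ∈ endsOf ls off) : off ≤ y := by
  induction ls generalizing off with
  | nil => simp [endsOf] at h
  | cons l rest ih =>
    have hlen : (0 : Int) ≤ PySem.Str.len l := by
      rw [PySem.Str.len_eq]; positivity
    simp only [endsOf, List.mem_cons] at h
    rcases h with h | h
    · omega
    · have := ih _ h; omega

theorem endsOf_pairwise (ls : List String) (off : Int) : (endsOf ls off).Pairwise (· ≤ ·) := by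
  induction ls generalizing off with
  | nil => simp [endsOf]
  | cons l rest ih =>
    simp only [endsOf, List.pairwise_cons]
    refine ⟨fun y hy => ?_, ih _⟩
    have := le_of_mem_endsOf _ _ _ hy
    omega

-- A's scan computes bisect_left over the cumulative end offsets, clamped to the last line
theorem aLoop_eq_findIdx (ms : Int) (ls : List String) (i : Nat) (off : Int) (hne : ls ≠ []) :
    aLoop ms ls i off (i + ls.length) =
      i + min (List.findIdx (fun e => decide (ms ≤ e)) (endsOf ls off)) (ls.length - 1) := by
  induction ls generalizing i off with
  | nil => exact absurd rfl hne
  | cons l rest ih =>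
    by_cases hrest : rest = []
    · subst hrest
      simp [aLoop, endsOf, List.findIdx_cons]
    · have hlen : 1 ≤ rest.length := by
        have := List.length_pos_iff.mpr hrest; omega
      by_cases hms : ms ≤ off + (l.length : Int)
      · simp [aLoop, endsOf, List.findIdx_cons, PySem.Str.len_eq, hms]
      · have hstep : aLoop ms (l :: rest) i off (i + (l :: rest).length) =
            aLoop ms rest (i + 1) (off + PySem.Str.len l + 1) (i + (l :: rest).length) := by
          simp [aLoop, PySem.Str.len_eq, hms, hrest]
        have htot : i + (l :: rest).length = (i + 1) + rest.length := by
          simp [List.length_cons]; omega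
        rw [hstep, htot, ih _ _ hrest]
        simp only [endsOf, List.findIdx_cons, PySem.Str.len_eq, Bool.cond_eq_ite,
          decide_eq_true_eq, List.length_cons]
        rw [if_neg (by simpa using hms)]
        omega
-- if everything below lo is < x and everything from lo on is ≥ x, findIdx pins down lo
theorem findIdx_pin (ends : List Int) (x : Int) (lo : Nat) (hlo : lo ≤ ends.length)
    (hbelow : ∀ j (_ : j < lo) (hj' : j < ends.length), ends[j] < x)
    (habove : ∀ j (_ : lo ≤ j) (hj' : j < ends.length), x ≤ ends[j]) :
    List.findIdx (fun e => decide (x ≤ e)) ends = lo := by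
  rcases Nat.lt_or_ge lo ends.length with h | h
  · rw [List.findIdx_eq h]
    exact ⟨by simpa using habove lo (le_refl _) h,
           fun j hj => by simpa using (hbelow j hj (by omega)).not_ge⟩
  · have : lo = ends.length := by omega
    subst this
    rw [List.findIdx_eq_length]
    intro y hy
    obtain ⟨j, hj, rfl⟩ := List.getElem_of_mem hy
    simpa using (hbelow j hj hj).not_ge

-- the bisect_left loop invariant: everything below lo is < x, everything from hi on is ≥ x
theorem bisectGo_eq_findIdx (ends : List Int) (x : Int)
    (hpw : ends.Pairwise (· ≤ ·)) :
    ∀ fuel lo hi, hi - lo ≤ fuel → lo ≤ hi → hi ≤ ends.length →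
    (∀ j (_ : j < lo) (hj' : j < ends.length), ends[j] < x) →
    (∀ j (_ : hi ≤ j) (hj' : j < ends.length), x ≤ ends[j]) →
    bisectGo ends x fuel lo hi = List.findIdx (fun e => decide (x ≤ e)) ends := by
  have hmono : ∀ i j (hi : i < ends.length) (hj : j < ends.length), i ≤ j → ends[i] ≤ ends[j] := by
    intro i j hi hj hij
    rcases Nat.lt_or_ge i j with h | h
    · exact List.pairwise_iff_getElem.mp hpw i j hi hj h
    · have : i = j := by omega
      subst this; exact le_refl _
  intro fuel
  induction fuel with
  | zero =>
    intro lo hi hf hlh hhi hbelow habove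
    have : lo = hi := by omega
    subst this
    exact (findIdx_pin ends x lo hhi hbelow (fun j hj hj' => habove j hj hj')).symm
  | succ fuel ih =>
    intro lo hi hf hlh hhi hbelow habove
    by_cases hlt : lo < hi
    · have hmid : (lo + hi) / 2 < ends.length := by omega
      rw [bisectGo, if_pos hlt]
      by_cases hcond : PySem.List.pyGetD ends (((lo + hi) / 2 : Nat) : Int) 0 < x
      · rw [if_pos hcond]
        rw [PySem.List.pyGetD_natCast, List.getD_eq_getElem _ _ hmid] at hcond
        refine ih _ _ (by omega) (by omega) hhi ?_ habove
        intro j hj hj'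
        have := hmono j ((lo + hi) / 2) hj' hmid (by omega)
        omega
      · rw [if_neg hcond]
        rw [PySem.List.pyGetD_natCast, List.getD_eq_getElem _ _ hmid] at hcond
        refine ih _ _ (by omega) (by omega) (by omega) hbelow ?_
        intro j hj hj'
        have := hmono ((lo + hi) / 2) j hmid hj' hj
        omega
    · have : lo = hi := by omega
      subst this
      rw [bisectGo, if_neg hlt]
      exact (findIdx_pin ends x lo hhi hbelow (fun j hj hj' => habove j hj hj')).symm

theorem bisectLoop_eq_findIdx (ends : List Int) (x : Int)
    (hpw : ends.Pairwise (· ≤ ·)) (lo hi : Nat) (hlh : lo ≤ hi) (hhi : hi ≤ ends.length)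
    (hbelow : ∀ j (_ : j < lo) (hj' : j < ends.length), ends[j] < x)
    (habove : ∀ j (_ : hi ≤ j) (hj' : j < ends.length), x ≤ ends[j]) :
    bisectLoop ends x lo hi = List.findIdx (fun e => decide (x ≤ e)) ends :=
  bisectGo_eq_findIdx ends x hpw (hi - lo) lo hi (le_refl _) hlh hhi hbelow habove

-- combining: A's scan index equals B's clamped bisect index
theorem scan_eq_bisect (ms : Int) (lines : List String) (hne : lines ≠ []) :
    aLoop ms lines 0 0 lines.length =
      min (bisectLoop (endsOf lines 0) ms 0 (endsOf lines 0).length) (lines.length - 1) := by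
  rw [bisectLoop_eq_findIdx (endsOf lines 0) ms (endsOf_pairwise lines 0) 0
        (endsOf lines 0).length (Nat.zero_le _) (le_refl _)
        (by intro j hj _; omega) (by intro j hj hj'; omega)]
  simpa using aLoop_eq_findIdx ms lines 0 0 hne

-- ===== VERDICT (by name: the statement is the Claim_ definition above) =====
theorem make_line_context_py_spec : Claim_equal_make_line_context_py := by
  intro text ms cl _
  unfold Spec_make_line_context_py make_line_context_py make_line_context_py_alt
  by_cases hempty : text.toList = []
  · simp [hempty]
  · rw [if_neg hempty, if_neg hempty]
    have hne : (if PySem.Str.splitlines text = [] then [text] else PySem.Str.splitlines text) ≠ [] := by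
      split_ifs with h
      · simp
      · exact h
    dsimp only
    rw [scan_eq_bisect ms _ hne, endsOf_length]
-- ===== end =====
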